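-- pv_equiv track=rewrite | github.com/Nghia03092004/nghia03092004.github.io | project_euler_unified/problem_979/solution.py | solve_sum
-- ===== SOURCE A (Python) =====
-- def solve_sum(N, k):
--     """Compute sum of J(n, k) for n=1..N and return (total, positions)."""
--     total = 0
--     js = []
--     for n in range(1, N + 1):
--         j = 0
--         for i in range(2, n + 1):
--             j = (j + k) % i
--         j += 1  # 1-indexed
--         total += j
--         js.append(j)
--     return total, js
-- ===== SOURCE B (Python) =====
-- def solve_sum(N, k):
--     """Compute sum of J(n, k) for n=1..N and return (total, positions)."""
--     total = 0
--     js = []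
--     j = 0
--     for n in range(1, N + 1):
--         if n > 1:
--             j = (j + k) % n
--         js.append(j + 1)
--         total += j + 1
--     return total, js
-- ===== Notes on version B (the rewrite author's own statement) =====
-- stated objective: faster
-- what changed: B maintains the Josephus recurrence value j across n in a single pass instead of recomputing the inner loop from scratch for every n.
import Mathlib
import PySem

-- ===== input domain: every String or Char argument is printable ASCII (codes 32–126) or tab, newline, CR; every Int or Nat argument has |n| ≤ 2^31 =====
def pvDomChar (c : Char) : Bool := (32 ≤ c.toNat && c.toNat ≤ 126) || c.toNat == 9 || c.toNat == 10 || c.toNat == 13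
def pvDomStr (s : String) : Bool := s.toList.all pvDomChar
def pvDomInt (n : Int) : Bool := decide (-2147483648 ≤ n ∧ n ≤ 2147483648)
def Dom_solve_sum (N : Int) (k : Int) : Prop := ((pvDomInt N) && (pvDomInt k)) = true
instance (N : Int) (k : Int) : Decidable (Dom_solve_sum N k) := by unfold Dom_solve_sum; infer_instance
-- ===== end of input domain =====

-- B recomputes nothing: it carries the Josephus recurrence value j across n in one pass (O(N))
-- where A restarts the inner recurrence loop from 0 for every n (O(N^2)); return values are identical.

-- ===== PORT A =====
-- literal port: outer loop over range(1, N+1) with state (total, js);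
-- inner loop over range(2, n+1) recomputing j from 0 each time.
def solve_sum (N : Int) (k : Int) : Int × List Int :=
  (PySem.List.pyRange 1 (N+1) 1).foldl
    (fun (st : Int × List Int) n =>
      let j := (PySem.List.pyRange 2 (n+1) 1).foldl (fun j i => PySem.Int.mod (j + k) i) 0
      let j := j + 1
      (st.1 + j, st.2 ++ [j]))
    (0, [])

-- ===== PORT B =====
-- literal port of Source B: one pass, state (j, total, js); j updated in place by the recurrence.
def solve_sum_alt (N : Int) (k : Int) : Int × List Int :=
  let st := (PySem.List.pyRange 1 (N+1) 1).foldl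
    (fun (st : Int × Int × List Int) n =>
      let j := if n > 1 then PySem.Int.mod (st.1 + k) n else st.1
      (j, st.2.1 + (j + 1), st.2.2 ++ [j + 1]))
    (0, 0, [])
  (st.2.1, st.2.2)

-- ===== PRECONDITION & SPEC =====
def Spec_solve_sum (N : Int) (k : Int) (out : Int × List Int) : Prop := out = solve_sum_alt N k
instance (N : Int) (k : Int) (out : Int × List Int) : Decidable (Spec_solve_sum N k out) := by unfold Spec_solve_sum; infer_instance

-- ===== CLAIM (what is proved, stated in full; the proofs are below) =====
def Claim_equal_solve_sum : Prop := ∀ (N : Int) (k : Int), Dom_solve_sum N k → Spec_solve_sum N k (solve_sum N k)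

-- ===== LEMMAS AND PROOFS =====

-- A's inner-loop value for a given n (here n = m : Nat): J(n,k) - 1
def jA (k : Int) (m : Nat) : Int :=
  (PySem.List.pyRange 2 ((m : Int) + 1) 1).foldl (fun j i => PySem.Int.mod (j + k) i) 0

lemma jA_zero (k : Int) : jA k 0 = 0 := by
  simp [jA, PySem.List.pyRange_one_eq_nil]

lemma jA_one (k : Int) : jA k 1 = 0 := by
  simp [jA, PySem.List.pyRange_one_eq_nil]

lemma jA_succ (k : Int) (m : Nat) (h : 1 ≤ m) :
    jA k (m + 1) = PySem.Int.mod (jA k m + k) ((m : Int) + 1) := by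
  unfold jA
  push_cast
  have h2 : (2 : Int) ≤ (m : Int) + 1 := by exact_mod_cast Nat.succ_le_succ h
  rw [PySem.List.pyRange_one_succ_right h2]
  simp [List.foldl_append]

-- the two folds over range(1, m+1) agree; B's j component equals jA k m throughout
lemma folds_agree (k : Int) (m : Nat) :
    (PySem.List.pyRange 1 ((m : Int) + 1) 1).foldl
      (fun (st : Int × Int × List Int) n =>
        let j := if n > 1 then PySem.Int.mod (st.1 + k) n else st.1
        (j, st.2.1 + (j + 1), st.2.2 ++ [j + 1]))
      (0, 0, []) =
    (jA k m,
     ((PySem.List.pyRange 1 ((m : Int) + 1) 1).foldl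
       (fun (st : Int × List Int) n =>
         let j := (PySem.List.pyRange 2 (n+1) 1).foldl (fun j i => PySem.Int.mod (j + k) i) 0
         let j := j + 1
         (st.1 + j, st.2 ++ [j])) (0, [])).1,
     ((PySem.List.pyRange 1 ((m : Int) + 1) 1).foldl
       (fun (st : Int × List Int) n =>
         let j := (PySem.List.pyRange 2 (n+1) 1).foldl (fun j i => PySem.Int.mod (j + k) i) 0
         let j := j + 1
         (st.1 + j, st.2 ++ [j])) (0, [])).2) := by
  induction m with
  | zero =>
      simp [PySem.List.pyRange_one_eq_nil, jA_zero]
  | succ m ih =>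
      have hsplit : PySem.List.pyRange 1 ((m : Int) + 1 + 1) 1
          = PySem.List.pyRange 1 ((m : Int) + 1) 1 ++ [(m : Int) + 1] := by
        exact PySem.List.pyRange_one_succ_right (by omega)
      push_cast
      rw [hsplit]
      rw [List.foldl_append, List.foldl_append, ih]
      by_cases hm : 1 ≤ m
      · have hgt : ((m : Int) + 1) > 1 := by exact_mod_cast Nat.lt_add_of_pos_left hm
        have hrec := jA_succ k m hm
        simp only [List.foldl_cons, List.foldl_nil]
        rw [if_pos hgt]
        unfold jA at hrec ⊢
        push_cast at hrec ⊢
        rw [hrec]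
      · have hm0 : m = 0 := by omega
        subst hm0
        simp only [List.foldl_cons, List.foldl_nil]
        simp [jA_zero, jA_one, jA, PySem.List.pyRange_one_eq_nil]

-- ===== VERDICT (by name: the statement is the Claim_ definition above) =====
theorem solve_sum_spec : Claim_equal_solve_sum := by
  intro N k _
  unfold Spec_solve_sum solve_sum solve_sum_alt
  by_cases hN : N ≤ 0
  · rw [PySem.List.pyRange_one_eq_nil (by omega)]
    simp
  · have hm : N = ((N.toNat : Int)) := by omega
    rw [hm, folds_agree k N.toNat]
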